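-- pv_equiv track=rewrite | github.com/googleinterns/compositional-generalization-2021 | datasets/cfq/data_generation.py | cfq_rewrite_cartesian
-- ===== SOURCE A (Python) =====
-- def cfq_rewrite_cartesian(triplets):
--   if not triplets:
--     return triplets
--   triplet = triplets[0]
--   tokens = triplet.split(" ")
--   if len(tokens) == 3 and tokens[1] != "a":
--     relation = tokens[1]
--     left_tokens = [tokens[0]]
--     right_tokens = [tokens[2]]
--     relation_pairs = [(tokens[0], tokens[2])]
--     to_delete = [triplet]
--     to_keep = []
--     for triplet2 in triplets[1:]:
--       tokens2 = triplet2.split(" ")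
--       if len(tokens2) == 3 and tokens2[1] == relation:
--         relation_pairs.append((tokens2[0], tokens2[2]))
--         if tokens2[0] not in left_tokens:
--           left_tokens.append(tokens2[0])
--         if tokens2[2] not in right_tokens:
--           right_tokens.append(tokens2[2])
--         to_delete.append(triplet2)
--       else:
--         to_keep.append(triplet2)
--     any_missing = False
--     for left_token in left_tokens:
--       for right_token in right_tokens:
--         if (left_token, right_token) not in relation_pairs:
--           any_missing = True
--           break
--       if any_missing:
--         break
--     if any_missing:
--       return ["( " + tokens[0] + " ) ( " + relation + " ) ( " + tokens[2] + " )"] + cfq_rewrite_cartesian(triplets[1:])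
--     else:
--       new_triplet = "( " + " ".join(left_tokens) + " ) ( " + relation + " ) ( " + " ".join(right_tokens) + " )"
--       return [new_triplet] + cfq_rewrite_cartesian(to_keep)
--
--   else:
--     return [triplet] + cfq_rewrite_cartesian(triplets[1:])
-- ===== SOURCE B (Python) =====
-- def cfq_rewrite_cartesian(triplets):
--   result = []
--   remaining = triplets
--   while remaining:
--     head, rest = remaining[0], remaining[1:]
--     tokens = head.split(" ")
--     if len(tokens) != 3 or tokens[1] == "a":
--       result.append(head)
--       remaining = rest
--       continue
--     rel = tokens[1]
--     matches = [t.split(" ") for t in rest]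
--     pairs = [(tokens[0], tokens[2])] + [(m[0], m[2]) for m in matches
--                                         if len(m) == 3 and m[1] == rel]
--     keep = [t for t, m in zip(rest, matches) if not (len(m) == 3 and m[1] == rel)]
--     left = list(dict.fromkeys(p[0] for p in pairs))
--     right = list(dict.fromkeys(p[1] for p in pairs))
--     if all((l, r) in pairs for l in left for r in right):
--       result.append("( " + " ".join(left) + " ) ( " + rel + " ) ( " + " ".join(right) + " )")
--       remaining = keep
--     else:
--       result.append("( " + tokens[0] + " ) ( " + rel + " ) ( " + tokens[2] + " )")
--       remaining = rest
--   return result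
-- ===== Notes on version B (the rewrite author's own statement) =====
-- stated objective: idiomatic
-- what changed: Replaces A's head-prepend recursion and stateful append loops with an iterative accumulator loop whose body partitions the tail once comprehension-style, dedups left/right tokens via dict.fromkeys over the pair list, and tests Cartesian completeness with a single all() instead of A's nested break-flag loops.
import Mathlib
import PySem

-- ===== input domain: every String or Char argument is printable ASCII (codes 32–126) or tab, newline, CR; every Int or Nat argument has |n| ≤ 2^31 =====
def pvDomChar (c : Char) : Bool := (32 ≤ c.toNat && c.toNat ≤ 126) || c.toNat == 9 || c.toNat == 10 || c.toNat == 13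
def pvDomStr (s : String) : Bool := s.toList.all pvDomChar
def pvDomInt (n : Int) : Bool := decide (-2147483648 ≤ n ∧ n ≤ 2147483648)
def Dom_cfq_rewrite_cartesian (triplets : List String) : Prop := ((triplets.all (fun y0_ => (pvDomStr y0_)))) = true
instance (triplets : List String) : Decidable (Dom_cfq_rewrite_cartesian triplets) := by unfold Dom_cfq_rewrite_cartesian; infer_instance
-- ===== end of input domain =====

-- B replaces A's head-prepend recursion and nested break-flag loops with an iterative accumulator
-- loop whose body partitions the tail once comprehension-style, dedups via dict.fromkeys and
-- checks Cartesian completeness with a single all(); objective: idiomatic (same asymptotic cost).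

-- shared library call: t.split(" ") (sep is the non-empty " ", so split? is always `some`)
def pvSplit (t : String) : List String := (PySem.Str.split? t " ").getD []

-- ===== PORT A =====
-- the body of A's `for triplet2 in triplets[1:]` loop,
-- state = (relation_pairs, left_tokens, right_tokens, to_delete, to_keep)
def pvStepA (relation : String)
    (s : List (String × String) × List String × List String × List String × List String)
    (triplet2 : String) :
    List (String × String) × List String × List String × List String × List String :=
  let tokens2 := pvSplit triplet2
  if tokens2.length == 3 && tokens2.getD 1 "" == relation then
    (s.1 ++ [(tokens2.getD 0 "", tokens2.getD 2 "")],
     (if s.2.1.contains (tokens2.getD 0 "") then s.2.1 else s.2.1 ++ [tokens2.getD 0 ""]),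
     (if s.2.2.1.contains (tokens2.getD 2 "") then s.2.2.1 else s.2.2.1 ++ [tokens2.getD 2 ""]),
     s.2.2.2.1 ++ [triplet2],
     s.2.2.2.2)
  else
    (s.1, s.2.1, s.2.2.1, s.2.2.2.1, s.2.2.2.2 ++ [triplet2])

-- termination helper for A's port (the recursive call on to_keep)
lemma pvStepA_keep_len (rest : List String) (relation : String) :
    ∀ s, ((rest.foldl (pvStepA relation) s).2.2.2.2).length ≤ s.2.2.2.2.length + rest.length := by
  induction rest with
  | nil => intro s; simp
  | cons t rest ih =>
    intro s
    have h2 : ((pvStepA relation s t).2.2.2.2).length ≤ s.2.2.2.2.length + 1 := by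
      simp only [pvStepA]
      split <;> simp
    have h3 := ih (pvStepA relation s t)
    simp only [List.foldl_cons, List.length_cons]
    omega

def cfq_rewrite_cartesian : List String → List String
  | [] => []
  | triplet :: rest =>
    let tokens := pvSplit triplet
    if tokens.length == 3 && tokens.getD 1 "" != "a" then
      let relation := tokens.getD 1 ""
      let st := rest.foldl (pvStepA relation)
        ([(tokens.getD 0 "", tokens.getD 2 "")], [tokens.getD 0 ""], [tokens.getD 2 ""], [triplet], [])
      let relationPairs := st.1
      let leftTokens := st.2.1
      let rightTokens := st.2.2.1
      let toKeep := st.2.2.2.2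
      let anyMissing := leftTokens.foldl
        (fun am l => if am then am else rightTokens.foldl
          (fun am2 r => if am2 then am2 else if relationPairs.contains (l, r) then am2 else true) am) false
      if anyMissing then
        ("( " ++ tokens.getD 0 "" ++ " ) ( " ++ relation ++ " ) ( " ++ tokens.getD 2 "" ++ " )")
          :: cfq_rewrite_cartesian rest
      else
        ("( " ++ PySem.Str.join " " leftTokens ++ " ) ( " ++ relation ++ " ) ( "
            ++ PySem.Str.join " " rightTokens ++ " )")
          :: cfq_rewrite_cartesian toKeep
    else
      triplet :: cfq_rewrite_cartesian rest
termination_by triplets => triplets.length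
decreasing_by
  · simp
  · have h := pvStepA_keep_len rest ((pvSplit triplet).getD 1 "")
      ([((pvSplit triplet).getD 0 "", (pvSplit triplet).getD 2 "")],
       [(pvSplit triplet).getD 0 ""], [(pvSplit triplet).getD 2 ""], [triplet], [])
    simp at h ⊢
    omega
  · simp

-- ===== PORT B =====
-- Source B's `while remaining:` loop with its `result` accumulator
def pvLoopB (result remaining : List String) : List String :=
  match remaining with
  | [] => result
  | head :: rest =>
    let tokens := pvSplit head
    if tokens.length != 3 || tokens.getD 1 "" == "a" then
      pvLoopB (result ++ [head]) rest
    else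
      let rel := tokens.getD 1 ""
      let ms := rest.map pvSplit
      let pairs := (tokens.getD 0 "", tokens.getD 2 "") ::
        ms.filterMap (fun m => if m.length == 3 && m.getD 1 "" == rel
                               then some (m.getD 0 "", m.getD 2 "") else none)
      let keep := ((rest.zip ms).filter (fun p => !(p.2.length == 3 && p.2.getD 1 "" == rel))).map Prod.fst
      let left := PySem.List.dedup (pairs.map Prod.fst)
      let right := PySem.List.dedup (pairs.map Prod.snd)
      if left.all (fun l => right.all (fun r => pairs.contains (l, r))) then
        pvLoopB (result ++ ["( " ++ PySem.Str.join " " left ++ " ) ( " ++ rel ++ " ) ( "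
                              ++ PySem.Str.join " " right ++ " )"]) keep
      else
        pvLoopB (result ++ ["( " ++ tokens.getD 0 "" ++ " ) ( " ++ rel ++ " ) ( "
                              ++ tokens.getD 2 "" ++ " )"]) rest
termination_by remaining.length
decreasing_by
  · simp
  · have h1 : (((rest.zip (rest.map pvSplit)).filter
        (fun p => !(p.2.length == 3 && p.2.getD 1 "" == (pvSplit head).getD 1 ""))).map Prod.fst).length
        ≤ rest.length := by
      have h2 := List.length_filter_le
        (fun p => !(p.2.length == 3 && p.2.getD 1 "" == (pvSplit head).getD 1 ""))
        (rest.zip (rest.map pvSplit))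
      simp at h2 ⊢
      omega
    simp at h1 ⊢
    omega
  · simp

def cfq_rewrite_cartesian_alt (triplets : List String) : List String := pvLoopB [] triplets

-- ===== PRECONDITION & SPEC =====
def Spec_cfq_rewrite_cartesian (triplets : List String) (out : List String) : Prop := out = cfq_rewrite_cartesian_alt triplets
instance (triplets : List String) (out : List String) : Decidable (Spec_cfq_rewrite_cartesian triplets out) := by unfold Spec_cfq_rewrite_cartesian; infer_instance

-- ===== CLAIM (what is proved, stated in full; the proofs are below) =====
def Claim_equal_cfq_rewrite_cartesian : Prop := ∀ (triplets : List String), Dom_cfq_rewrite_cartesian triplets → Spec_cfq_rewrite_cartesian triplets (cfq_rewrite_cartesian triplets)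

-- ===== LEMMAS AND PROOFS =====

def pvPred (relation t : String) : Bool :=
  let tk := pvSplit t
  tk.length == 3 && tk.getD 1 "" == relation

def pvPair (t : String) : String × String :=
  let tk := pvSplit t
  (tk.getD 0 "", tk.getD 2 "")

def pvGroup (relation : String) (rest : List String) : List (String × String) :=
  rest.filterMap (fun t => if pvPred relation t then some (pvPair t) else none)

lemma pv_dedup_append_singleton {α : Type} [BEq α] (xs : List α) (x : α) :
    PySem.List.dedup (xs ++ [x])
      = (if (PySem.List.dedup xs).contains x then PySem.List.dedup xs else PySem.List.dedup xs ++ [x]) := by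
  simp only [PySem.List.dedup_eq_ofList, PySem.Set.ofList_append_singleton, PySem.Set.add,
    PySem.Set.contains_eq_listContains]
  rfl

lemma pvFoldA_spec (relation : String) :
    ∀ (rest : List String) (pairs : List (String × String)) (del keep : List String),
    rest.foldl (pvStepA relation)
        (pairs, PySem.List.dedup (pairs.map Prod.fst), PySem.List.dedup (pairs.map Prod.snd), del, keep)
      = (pairs ++ pvGroup relation rest,
         PySem.List.dedup ((pairs ++ pvGroup relation rest).map Prod.fst),
         PySem.List.dedup ((pairs ++ pvGroup relation rest).map Prod.snd),
         del ++ rest.filter (pvPred relation),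
         keep ++ rest.filter (fun t => !pvPred relation t)) := by
  intro rest
  induction rest with
  | nil => intro pairs del keep; simp [pvGroup]
  | cons t rest ih =>
    intro pairs del keep
    by_cases hp : pvPred relation t = true
    · have hp' := hp
      simp only [pvPred] at hp'
      have hstep : pvStepA relation
          (pairs, PySem.List.dedup (pairs.map Prod.fst), PySem.List.dedup (pairs.map Prod.snd), del, keep) t
          = (pairs ++ [pvPair t],
             PySem.List.dedup ((pairs ++ [pvPair t]).map Prod.fst),
             PySem.List.dedup ((pairs ++ [pvPair t]).map Prod.snd),
             del ++ [t], keep) := by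
        simp only [pvStepA, pvPair, if_pos hp', List.map_append, List.map_cons, List.map_nil,
          pv_dedup_append_singleton]
      rw [List.foldl_cons, hstep, ih (pairs ++ [pvPair t]) (del ++ [t]) keep]
      simp [pvGroup, hp, List.append_assoc]
    · have hp' : (pvPred relation t) = false := by simpa using hp
      have hp'' := hp'
      simp only [pvPred] at hp''
      have hstep : pvStepA relation
          (pairs, PySem.List.dedup (pairs.map Prod.fst), PySem.List.dedup (pairs.map Prod.snd), del, keep) t
          = (pairs, PySem.List.dedup (pairs.map Prod.fst), PySem.List.dedup (pairs.map Prod.snd),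
             del, keep ++ [t]) := by
        simp only [pvStepA, hp'']
        simp
      rw [List.foldl_cons, hstep, ih pairs del (keep ++ [t])]
      simp [pvGroup, hp', List.append_assoc]

lemma pvInner (pairs : List (String × String)) (l : String) :
    ∀ (right : List String) (am : Bool),
    right.foldl (fun am2 r => if am2 then am2 else if pairs.contains (l, r) then am2 else true) am
      = (am || right.any (fun r => !pairs.contains (l, r))) := by
  intro right
  induction right with
  | nil => intro am; simp
  | cons r right ih =>
    intro am
    rw [List.foldl_cons, ih]
    cases am
    · simp only [List.any_cons]
      cases h : pairs.contains (l, r) <;>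
        simp only [h, Bool.false_eq_true, if_false, reduceIte, Bool.not_true, Bool.not_false,
          Bool.true_or, Bool.false_or]
    · simp

lemma pvOuter (pairs : List (String × String)) (right : List String) :
    ∀ (left : List String) (am : Bool),
    left.foldl (fun am l => if am then am else right.foldl
        (fun am2 r => if am2 then am2 else if pairs.contains (l, r) then am2 else true) am) am
      = (am || left.any (fun l => right.any (fun r => !pairs.contains (l, r)))) := by
  intro left
  induction left with
  | nil => intro am; simp
  | cons l left ih =>
    intro am
    rw [List.foldl_cons, ih]
    cases am
    · rw [if_neg (by simp), pvInner]
      simp [List.any_cons]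
    · rfl

lemma pvAnyNot {α : Type} (c : α → Bool) (xs : List α) :
    xs.any (fun x => !c x) = !xs.all c := by
  induction xs with
  | nil => simp
  | cons x xs ih => simp [List.any_cons, List.all_cons, ih, Bool.not_and]

lemma pvAnyMissing (pairs : List (String × String)) (left right : List String) :
    (left.foldl (fun am l => if am then am else right.foldl
        (fun am2 r => if am2 then am2 else if pairs.contains (l, r) then am2 else true) am) false)
      = !(left.all (fun l => right.all (fun r => pairs.contains (l, r)))) := by
  rw [pvOuter]
  simp only [Bool.false_or]
  have h : (fun l => right.any (fun r => !pairs.contains (l, r)))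
      = (fun l => !(right.all (fun r => pairs.contains (l, r)))) := by
    funext l
    exact pvAnyNot (fun r => pairs.contains (l, r)) right
  rw [h]
  exact pvAnyNot (fun l => right.all (fun r => pairs.contains (l, r))) left

lemma pvKeepB (rel : String) (rest : List String) :
    (((rest.zip (rest.map pvSplit)).filter
        (fun p => !(p.2.length == 3 && p.2.getD 1 "" == rel))).map Prod.fst)
      = rest.filter (fun t => !pvPred rel t) := by
  induction rest with
  | nil => simp
  | cons t rest ih =>
    simp only [List.map_cons, List.zip_cons_cons, List.filter_cons, pvPred]
    cases hb : ((pvSplit t).length == 3 && (pvSplit t).getD 1 "" == rel) <;>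
      simp only [hb, Bool.not_false, Bool.not_true, Bool.false_eq_true, if_false, if_true,
        reduceIte, List.map_cons, ih] <;> rfl

lemma pvPairsB (rel : String) (rest : List String) :
    (rest.map pvSplit).filterMap (fun m => if m.length == 3 && m.getD 1 "" == rel
        then some (m.getD 0 "", m.getD 2 "") else none)
      = pvGroup rel rest := by
  rw [List.filterMap_map]
  rfl

lemma pvLoopB_eq : ∀ (n : Nat) (remaining : List String), remaining.length ≤ n →
    ∀ result, pvLoopB result remaining = result ++ cfq_rewrite_cartesian remaining := by
  intro n
  induction n with
  | zero =>
    intro remaining hlen result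
    have h : remaining = [] := by
      cases remaining with
      | nil => rfl
      | cons a b => simp at hlen
    subst h
    simp [pvLoopB, cfq_rewrite_cartesian]
  | succ n ih =>
    intro remaining hlen result
    cases remaining with
    | nil => simp [pvLoopB, cfq_rewrite_cartesian]
    | cons head rest =>
      have hrest : rest.length ≤ n := by simp at hlen; omega
      by_cases hc : ((pvSplit head).length == 3 && (pvSplit head).getD 1 "" != "a") = true
      · -- main branch: three-token triplet whose relation is not "a"
        have h3 : ((pvSplit head).length == 3) = true := by
          cases h : ((pvSplit head).length == 3) with
          | true => rfl
          | false => rw [h, Bool.false_and] at hc; exact absurd hc (by simp)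
        have ha : ((pvSplit head).getD 1 "" == "a") = false := by
          cases h : ((pvSplit head).getD 1 "" == "a") with
          | false => rfl
          | true => rw [h3, Bool.true_and, bne, h] at hc; exact absurd hc (by simp)
        have hB : (((pvSplit head).length != 3 || (pvSplit head).getD 1 "" == "a")) = false := by
          rw [bne, h3, ha]
          rfl
        have hded1 : ([(pvSplit head).getD 0 ""] : List String)
            = PySem.List.dedup (([((pvSplit head).getD 0 "", (pvSplit head).getD 2 "")].map Prod.fst)) := by
          simp [PySem.List.dedup_eq_ofList, PySem.Set.ofList]
        have hded2 : ([(pvSplit head).getD 2 ""] : List String)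
            = PySem.List.dedup (([((pvSplit head).getD 0 "", (pvSplit head).getD 2 "")].map Prod.snd)) := by
          simp [PySem.List.dedup_eq_ofList, PySem.Set.ofList]
        rw [cfq_rewrite_cartesian, pvLoopB]
        simp only [hc, hB, Bool.false_eq_true, if_true, if_false, reduceIte]
        simp only [hded1, hded2, pvFoldA_spec, pvPairsB, pvKeepB, List.singleton_append,
          List.nil_append]
        simp only [pvAnyMissing]
        set prs := (((pvSplit head).getD 0 "", (pvSplit head).getD 2 "")
            :: pvGroup ((pvSplit head).getD 1 "") rest) with hprs
        set lft := PySem.List.dedup (prs.map Prod.fst) with hlft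
        set rgt := PySem.List.dedup (prs.map Prod.snd) with hrgt
        cases hall : lft.all (fun l => rgt.all (fun r => prs.contains (l, r))) with
        | true =>
          simp only [hall, Bool.not_true, Bool.false_eq_true, if_false, reduceIte]
          rw [ih _ (le_trans (List.length_filter_le _ _) hrest)]
          simp [List.append_assoc]
        | false =>
          simp only [hall, Bool.not_false, if_true, reduceIte]
          rw [ih _ hrest]
          simp [List.append_assoc]
      · -- untouched/else branch
        have hc' : ((pvSplit head).length == 3 && (pvSplit head).getD 1 "" != "a") = false := by
          simpa using hc
        have hc'' : (((pvSplit head).length != 3 || (pvSplit head).getD 1 "" == "a")) = true := by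
          cases h1 : ((pvSplit head).length == 3) with
          | false => simp [bne, h1]
          | true =>
            cases h2 : ((pvSplit head).getD 1 "" == "a") with
            | true => simp [h2]
            | false =>
              exfalso
              have h4 : ((pvSplit head).getD 1 "" != "a") = false := by
                have h5 := hc'
                rw [h1, Bool.true_and] at h5
                exact h5
              rw [bne, h2] at h4
              simp at h4
        rw [cfq_rewrite_cartesian, pvLoopB]
        simp only [hc', hc'', Bool.false_eq_true, if_true, if_false, reduceIte]
        rw [ih _ hrest]
        simp [List.append_assoc]

-- ===== VERDICT (by name: the statement is the Claim_ definition above) =====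
theorem cfq_rewrite_cartesian_spec : Claim_equal_cfq_rewrite_cartesian := by
  intro triplets _
  unfold Spec_cfq_rewrite_cartesian cfq_rewrite_cartesian_alt
  rw [pvLoopB_eq triplets.length triplets (le_refl _) []]
  simp
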